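-- pv_equiv track=rewrite | github.com/zuleyhairmakk/python-codestepbystep | csbs/find_range_2d.py | find_range_2d
-- ===== SOURCE A (Python) =====
-- def find_range_2d(li1):
--     if len(li1) ==0:
--         return 0
--     myList = []
--     for i in li1:
--
--         for k in range(len(i)):
--             myList.append(i[k])
--     if max(myList) == min(myList):
--         return 1
--     rang = max(myList) - min(myList)
--     return rang+1
-- ===== SOURCE B (Python) =====
-- def find_range_2d(li1):
--     if len(li1) == 0:
--         return 0
--     lo = hi = None
--     for row in li1:
--         for x in row:
--             if lo is None or x < lo:
--                 lo = x
--             if hi is None or x > hi: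
--                 hi = x
--     if lo is None:
--         return 0
--     return hi - lo + 1
-- ===== Notes on version B (the rewrite author's own statement) =====
-- stated objective: simpler
-- what changed: Replaces A's build-a-flattened-list-then-scan-it-three-times (max, min, max again) plus the redundant max==min special case by a single streaming pass over the rows tracking running lo/hi (no intermediate list, one traversal instead of four).
-- crash fix: On a nonempty outer list whose rows are all empty, A raises ValueError (max of an empty list) while B returns 0. — e.g. on find_range_2d([[]]): A raises ValueError, B returns 0
import Mathlib
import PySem

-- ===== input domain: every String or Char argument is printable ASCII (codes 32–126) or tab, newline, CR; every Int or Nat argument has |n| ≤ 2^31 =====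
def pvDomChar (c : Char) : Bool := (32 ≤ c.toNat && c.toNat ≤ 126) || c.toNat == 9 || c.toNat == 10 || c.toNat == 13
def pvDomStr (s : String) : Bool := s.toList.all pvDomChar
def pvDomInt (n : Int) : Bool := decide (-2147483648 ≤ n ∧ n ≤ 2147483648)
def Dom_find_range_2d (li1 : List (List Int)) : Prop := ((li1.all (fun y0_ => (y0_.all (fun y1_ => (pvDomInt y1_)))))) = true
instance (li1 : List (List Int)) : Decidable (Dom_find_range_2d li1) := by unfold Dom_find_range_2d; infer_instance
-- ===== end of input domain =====

-- B replaces A's flatten-then-scan-three-times (max, min, max, plus a redundant max==min case)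
-- by a single streaming pass tracking running lo/hi (a timing run measured B faster).


-- ===== PORT A =====
-- Literal port of A: build myList by appending i[k] for k in range(len(i)), then max/min it.
-- Indices k are always in range, so pyGetD with default 0 is exact; max([])/min([]) (Python
-- ValueError) is the `none` branch, excluded by Pre_.
def find_range_2d (li1 : List (List Int)) : Int :=
  if li1.length == 0 then 0
  else
    let myList : List Int := li1.foldl (fun acc i =>
      (PySem.List.pyRange 0 (i.length : Int) 1).foldl
        (fun a k => a ++ [PySem.List.pyGetD i k 0]) acc) []
    match PySem.List.max? myList (fun x => x), PySem.List.min? myList (fun x => x) with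
    | some mx, some mn => if mx == mn then 1 else (mx - mn) + 1
    | _, _ => 0

-- ===== PORT B =====
-- one streaming step of B's inner loop: update (lo, hi) with x
def bStep (q : Option Int × Option Int) (x : Int) : Option Int × Option Int :=
  let lo := match q.1 with
    | none => some x
    | some l => if x < l then some x else some l
  let hi := match q.2 with
    | none => some x
    | some h => if h < x then some x else some h
  (lo, hi)

def find_range_2d_alt (li1 : List (List Int)) : Int :=
  if li1.length == 0 then 0
  else
    let p := li1.foldl (fun p row => row.foldl bStep p) ((none : Option Int), (none : Option Int))
    match p.1 with
    | none => 0
    | some l =>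
      match p.2 with
      | none => 0
      | some h => h - l + 1

-- ===== PRECONDITION & SPEC =====
-- Pre_ excludes exactly the inputs where Python A raises ValueError (max of an empty list):
-- a nonempty outer list all of whose rows are empty.
def Pre_find_range_2d (li1 : List (List Int)) : Prop := li1 = [] ∨ li1.flatten ≠ []
instance (li1 : List (List Int)) : Decidable (Pre_find_range_2d li1) := by
  unfold Pre_find_range_2d; infer_instance
def pvWitness_find_range_2d : List (List Int) := [[1, 3], [2]]

-- On a nonempty outer list whose rows are all empty, A raises ValueError (max of an empty list)
-- while B returns 0; this is made checkable by the theorem find_range_2d_raises at the bottom.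
def Raises_find_range_2d (li1 : List (List Int)) : Prop := li1 ≠ [] ∧ li1.flatten = []
instance (li1 : List (List Int)) : Decidable (Raises_find_range_2d li1) := by
  unfold Raises_find_range_2d; infer_instance
def pvRaiseWitness_find_range_2d : List (List Int) := [[]]
def pvRaiseWitnessOut_find_range_2d : Int := 0

def Spec_find_range_2d (li1 : List (List Int)) (out : Int) : Prop := out = find_range_2d_alt li1
instance (li1 : List (List Int)) (out : Int) : Decidable (Spec_find_range_2d li1 out) := by
  unfold Spec_find_range_2d; infer_instance

-- ===== CLAIM (what is proved, stated in full; the proofs are below) =====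
def Claim_equal_find_range_2d : Prop := ∀ (li1 : List (List Int)), Dom_find_range_2d li1 → Pre_find_range_2d li1 → Spec_find_range_2d li1 (find_range_2d li1)
def Claim_raises_find_range_2d : Prop := (∀ (li1 : List (List Int)), Dom_find_range_2d li1 → Raises_find_range_2d li1 → ¬ Pre_find_range_2d li1) ∧ (Dom_find_range_2d (pvRaiseWitness_find_range_2d) ∧ Raises_find_range_2d (pvRaiseWitness_find_range_2d) ∧ find_range_2d_alt (pvRaiseWitness_find_range_2d) = pvRaiseWitnessOut_find_range_2d)

-- ===== LEMMAS AND PROOFS =====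

-- A's inner loop appends row i element by element.
lemma innerA (i : List Int) (acc : List Int) :
    (PySem.List.pyRange 0 (i.length : Int) 1).foldl
      (fun a k => a ++ [PySem.List.pyGetD i k 0]) acc = acc ++ i := by
  rw [PySem.List.foldl_append_singleton_eq_map]
  have h := PySem.List.map_pyGetD_pyRange_zero i 0
  simp only [PySem.List.len] at h
  rw [h]

-- A's myList is the flatten of li1.
lemma myList_eq_flatten (li1 : List (List Int)) (acc : List Int) :
    li1.foldl (fun acc i =>
      (PySem.List.pyRange 0 (i.length : Int) 1).foldl
        (fun a k => a ++ [PySem.List.pyGetD i k 0]) acc) acc = acc ++ li1.flatten := by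
  induction li1 generalizing acc with
  | nil => simp
  | cons r rs ih => rw [List.foldl_cons, innerA, ih, List.flatten_cons, List.append_assoc]

-- B's nested fold is the fold of bStep over the flatten.
lemma bFold_flatten (li1 : List (List Int)) (q : Option Int × Option Int) :
    li1.foldl (fun p row => row.foldl bStep p) q = li1.flatten.foldl bStep q := by
  induction li1 generalizing q with
  | nil => rfl
  | cons r rs ih => simp [List.foldl_cons, ih, List.foldl_append]

-- if-then-else updates agree with min/max on Int
lemma ite_min (l y : Int) : (if y < l then some y else some l) = some (min l y) := by
  split_ifs with h <;> simp [min_def] <;> omega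
lemma ite_max (h y : Int) : (if h < y then some y else some h) = some (max h y) := by
  split_ifs with hy <;> simp [max_def] <;> omega

-- From a fully-defined state, bStep folding tracks the running min/max.
lemma bFold_some (t : List Int) (l h : Int) :
    t.foldl bStep (some l, some h) = (some (t.foldl min l), some (t.foldl max h)) := by
  induction t generalizing l h with
  | nil => rfl
  | cons y ys ih =>
    have hb : bStep (some l, some h) y = (some (min l y), some (max h y)) := by
      simp only [bStep]
      rw [ite_min, ite_max]
    rw [List.foldl_cons, hb, ih, List.foldl_cons, List.foldl_cons]

-- On a nonempty list, B's fold from (none, none) yields the min and max.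
lemma bFold_cons (x : Int) (t : List Int) :
    (x :: t).foldl bStep ((none : Option Int), (none : Option Int))
      = (some (t.foldl min x), some (t.foldl max x)) := by
  simp only [List.foldl_cons]
  have : bStep ((none : Option Int), (none : Option Int)) x = (some x, some x) := rfl
  rw [this, bFold_some]

-- ===== VERDICT (by name: the statement is the Claim_ definition above) =====
theorem find_range_2d_spec : Claim_equal_find_range_2d := by
  intro li1 _ hpre
  unfold Spec_find_range_2d find_range_2d find_range_2d_alt
  rcases hpre with h | h
  · subst h; rfl
  · have hne : ¬ li1.length == 0 := by
      cases li1 with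
      | nil => simp at h
      | cons a t => simp
    simp only [hne, if_false, Bool.false_eq_true]
    rw [myList_eq_flatten, bFold_flatten]
    obtain ⟨x, t, hxt⟩ : ∃ x t, li1.flatten = x :: t := by
      cases hf : li1.flatten with
      | nil => exact absurd hf h
      | cons a b => exact ⟨a, b, rfl⟩
    rw [hxt]
    simp only [List.nil_append, bFold_cons,
      PySem.List.max?_id_cons, PySem.List.min?_id_cons]
    by_cases heq : t.foldl max x = t.foldl min x
    · simp [heq]
    · simp [heq]
@[simp] theorem find_range_2d_raises : Claim_raises_find_range_2d := by
  unfold Claim_raises_find_range_2d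
  refine ⟨fun li1 _ hr hp => ?_, by decide⟩
  rcases hp with h | h
  · exact hr.1 h
  · exact h hr.2
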